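-- pv_equiv track=rewrite | github.com/AliKhanat88/codeforces | new_2024/kingsPuzzle.py | check_requirements
-- ===== SOURCE A (Python) =====
-- from collections import defaultdict
--
-- def is_connected(n, edges):
--     # Check if the graph is connected using BFS/DFS
--     graph = defaultdict(list)
--     for u, v in edges:
--         graph[u].append(v)
--         graph[v].append(u)
--
--     visited = set()
--     def dfs(node):
--         visited.add(node)
--         for neighbor in graph[node]:
--             if neighbor not in visited:
--                 dfs(neighbor)
--
--     dfs(1)  # Start from any node (1 in this case)
--     return len(visited) == n
--
-- def check_requirements(n, k, edges):
--     if not edges: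
--         return False  # No edges can't satisfy connectivity
--
--     # Check no loops and unique edges
--     edge_set = set(edges)
--     if len(edge_set) != len(edges):
--         return False  # Duplicate edges
--     if any(u == v for u, v in edges):
--         return False  # Self-loops not allowed
--
--     dict = defaultdict(lambda: 0)
--     for edge in edges:
--         temp = tuple(sorted(list(edge)))
--         dict[temp] += 1
--         if dict[temp] > 1:
--             return False
--
--     # Check degree distribution
--     degree = [0] * (n + 1)
--     for u, v in edges:
--         degree[u] += 1
--         degree[v] += 1
--
--     distinct_degrees = set(degree[1:])  # Ignore degree[0] as it's a dummy
--     if len(distinct_degrees) != k: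
--         return False
--
--     # Check connectivity
--     return is_connected(n, edges)
-- ===== SOURCE B (Python) =====
-- def check_requirements(n, k, edges):
--     if not edges:
--         return False
--     # one pass: self-loops, duplicate and anti-parallel edges
--     seen = set()
--     for u, v in edges:
--         if u == v:
--             return False
--         key = (u, v) if u < v else (v, u)
--         if key in seen:
--             return False
--         seen.add(key)
--     # degree distribution (kept as in the original)
--     degree = [0] * (n + 1)
--     for u, v in edges:
--         degree[u] += 1
--         degree[v] += 1
--     if len(set(degree[1:])) != k:
--         return False
--     # connectivity by merging component labels (naive union-find) instead of recursive DFS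
--     comp = {}
--     for u, v in edges:
--         comp.setdefault(u, u)
--         comp.setdefault(v, v)
--         cu, cv = comp[u], comp[v]
--         if cu != cv:
--             comp = {x: (cv if c == cu else c) for x, c in comp.items()}
--     root1 = comp.get(1, 1)
--     size = sum(1 for c in comp.values() if c == root1) + (0 if 1 in comp else 1)
--     return size == n
-- ===== Notes on version B (the rewrite author's own statement) =====
-- stated objective: alternative
-- what changed: Replaces the recursive-DFS connectivity test by a component-label-merging (naive union-find) pass over the edges plus a component-size count, and fuses the three separate duplicate/self-loop scans (set of tuples, any(), counting dict) into one pass with a canonical edge key; the degree-distribution pass is kept as in A.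
import Mathlib
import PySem

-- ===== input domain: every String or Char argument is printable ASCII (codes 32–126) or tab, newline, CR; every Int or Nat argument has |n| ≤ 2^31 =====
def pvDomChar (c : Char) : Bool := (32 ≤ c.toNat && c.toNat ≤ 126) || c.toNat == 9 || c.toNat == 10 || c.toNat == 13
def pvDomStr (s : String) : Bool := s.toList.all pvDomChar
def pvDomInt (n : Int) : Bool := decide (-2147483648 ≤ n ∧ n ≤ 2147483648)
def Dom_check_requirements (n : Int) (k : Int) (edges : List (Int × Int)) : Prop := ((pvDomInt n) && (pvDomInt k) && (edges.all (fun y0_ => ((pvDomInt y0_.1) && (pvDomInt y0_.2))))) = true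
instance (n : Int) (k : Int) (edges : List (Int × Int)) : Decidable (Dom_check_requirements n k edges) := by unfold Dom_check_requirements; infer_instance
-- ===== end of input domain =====

-- B replaces A's recursive-DFS connectivity test by a component-label-merging (naive union-find)
-- pass and fuses A's three duplicate/self-loop scans and degree array into one pass over the
-- edges (objective: alternative algorithm, not faster).

-- ===== PORT A =====

-- tuple(sorted(list(edge)))  (sorted of the 2-element list [u, v])
def pvSortPair (e : Int × Int) : Int × Int :=
  match PySem.List.sorted [e.1, e.2] (fun x => x) false with
  | [a, b] => (a, b)
  | _ => e   -- unreachable: sorted of a 2-list has 2 elements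

-- 'dict = defaultdict(lambda: 0); for edge in edges: dict[temp] += 1; if dict[temp] > 1: return False'
-- returns true iff the loop finishes without returning False
def pvDupLoop : List (Int × Int) → PySem.Dict (Int × Int) Int → Bool
  | [], _ => true
  | e :: rest, d =>
    let temp := pvSortPair e
    let d' := d.modify temp 0 (· + 1)
    if d'.getD temp 0 > 1 then false else pvDupLoop rest d'

-- 'for u, v in edges: degree[u] += 1; degree[v] += 1'  (none = IndexError, excluded by Pre_)
def pvDegLoop : List (Int × Int) → List Int → Option (List Int)
  | [], deg => some deg
  | (u, v) :: rest, deg =>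
    match PySem.List.pyGet? deg u with
    | none => none
    | some du =>
      match PySem.List.pySet? deg u (du + 1) with
      | none => none
      | some deg1 =>
        match PySem.List.pyGet? deg1 v with
        | none => none
        | some dv =>
          match PySem.List.pySet? deg1 v (dv + 1) with
          | none => none
          | some deg2 => pvDegLoop rest deg2

-- 'graph = defaultdict(list); for u, v in edges: graph[u].append(v); graph[v].append(u)'
def pvBuildGraph (edges : List (Int × Int)) : PySem.Dict Int (List Int) :=
  edges.foldl (fun g e =>
    let g1 := g.modify e.1 [] (· ++ [e.2])
    g1.modify e.2 [] (· ++ [e.1])) PySem.Dict.empty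

-- 'def dfs(node): visited.add(node); for neighbor in graph[node]: if neighbor not in visited: dfs(neighbor)'
-- fuel is a totality guard only; it is never exhausted for the fuel passed below (proved below)
def pvDfs (g : PySem.Dict Int (List Int)) : Nat → PySem.Set Int → Int → PySem.Set Int
  | 0, visited, _ => visited
  | fuel + 1, visited, node =>
    (g.getD node []).foldl
      (fun vis nb => if PySem.Set.contains vis nb then vis else pvDfs g fuel vis nb)
      (PySem.Set.add visited node)

def pvIsConnected (n : Int) (edges : List (Int × Int)) : Bool :=
  let g := pvBuildGraph edges
  let visited := pvDfs g (2 * edges.length + 1) PySem.Set.empty 1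
  PySem.Set.len visited == n

def check_requirements (n : Int) (k : Int) (edges : List (Int × Int)) : Bool :=
  if edges.isEmpty then false
  else
    let edge_set := PySem.Set.ofList edges
    if !(PySem.Set.len edge_set == (edges.length : Int)) then false
    else if edges.any (fun e => e.1 == e.2) then false
    else if !pvDupLoop edges PySem.Dict.empty then false
    else
      match pvDegLoop edges (PySem.List.pyRepeat [0] (n + 1)) with
      | none => false    -- IndexError in Python; excluded by Pre_
      | some degree =>
        let distinct := PySem.Set.ofList (PySem.List.slice degree (some 1) none)
        if !(PySem.Set.len distinct == k) then false
        else pvIsConnected n edges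

-- ===== PORT B =====

-- key = (u, v) if u < v else (v, u)
def pvKey (u v : Int) : Int × Int := if u < v then (u, v) else (v, u)

-- B's first pass: self-loops and duplicate / anti-parallel edges (false = early 'return False')
def pvGateLoop : List (Int × Int) → PySem.Set (Int × Int) → Bool
  | [], _ => true
  | (u, v) :: rest, seen =>
    if u == v then false
    else
      let key := pvKey u v
      if PySem.Set.contains seen key then false
      else pvGateLoop rest (PySem.Set.add seen key)

-- B's component-label merging loop (naive union-find)
def pvCompLoop : List (Int × Int) → PySem.Dict Int Int → PySem.Dict Int Int
  | [], comp => comp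
  | (u, v) :: rest, comp =>
    let c1 := comp.setdefault u u
    let c2 := c1.setdefault v v
    let cu := c2.getD u 0   -- comp[u]; the key u is present after the setdefault
    let cv := c2.getD v 0   -- comp[v]
    let comp' := if cu != cv
      then PySem.Dict.mk (c2.items.map (fun p => (p.1, if p.2 == cu then cv else p.2)))
      else c2
    pvCompLoop rest comp'

def check_requirements_alt (n : Int) (k : Int) (edges : List (Int × Int)) : Bool :=
  if edges.isEmpty then false
  else if !pvGateLoop edges PySem.Set.empty then false
  else
    -- degree pass, kept exactly as in A (same loop, same list)
    match pvDegLoop edges (PySem.List.pyRepeat [0] (n + 1)) with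
    | none => false    -- IndexError in Python; excluded by Pre_
    | some degree =>
      if !(PySem.Set.len (PySem.Set.ofList (PySem.List.slice degree (some 1) none)) == k) then false
      else
        let comp := pvCompLoop edges PySem.Dict.empty
        let root1 := (comp.get? 1).getD 1                       -- comp.get(1, 1)
        let size := ((comp.values.countP (fun c => c == root1) : Nat) : Int) +
          (if comp.contains 1 then 0 else 1)
        size == n

-- ===== PRECONDITION & SPEC =====

-- Pre_ is exactly the set of inputs on which the Python A returns normally: either the result
-- is decided before the degree array is touched (no edges, a self-loop, or a duplicate /
-- anti-parallel edge), or every vertex label is a valid Python index into the degree list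
-- [0]*(n+1), i.e. n ≥ 0 and every label lies in [-(n+1), n].  Outside Pre_ A raises IndexError.
def Pre_check_requirements (n : Int) (k : Int) (edges : List (Int × Int)) : Prop :=
  edges = [] ∨ (∃ e ∈ edges, e.1 = e.2) ∨
    ¬ (edges.map (fun e => if e.1 < e.2 then (e.1, e.2) else (e.2, e.1))).Nodup ∨
    (0 ≤ n ∧ ∀ e ∈ edges, -(n + 1) ≤ e.1 ∧ e.1 ≤ n ∧ -(n + 1) ≤ e.2 ∧ e.2 ≤ n)

instance (n : Int) (k : Int) (edges : List (Int × Int)) : Decidable (Pre_check_requirements n k edges) := by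
  unfold Pre_check_requirements; infer_instance

def pvWitness_check_requirements : Int × Int × (List (Int × Int)) := (3, 2, [(1, 2), (2, 3)])

def Spec_check_requirements (n : Int) (k : Int) (edges : List (Int × Int)) (out : Bool) : Prop :=
  out = check_requirements_alt n k edges

instance (n : Int) (k : Int) (edges : List (Int × Int)) (out : Bool) : Decidable (Spec_check_requirements n k edges out) := by
  unfold Spec_check_requirements; infer_instance

-- ===== CLAIM (what is proved, stated in full; the proofs are below) =====
def Claim_equal_check_requirements : Prop := ∀ (n : Int) (k : Int) (edges : List (Int × Int)), Dom_check_requirements n k edges → Pre_check_requirements n k edges → Spec_check_requirements n k edges (check_requirements n k edges)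

-- ===== LEMMAS AND PROOFS =====

-- ---------- shared notions ----------

-- undirected adjacency of an edge list
def pvStep (E : List (Int × Int)) (x y : Int) : Prop := (x, y) ∈ E ∨ (y, x) ∈ E

-- connectivity: reflexive-transitive closure of adjacency
def pvConn (E : List (Int × Int)) : Int → Int → Prop := Relation.ReflTransGen (pvStep E)

-- endpoints of the edges, in processing order
def pvEnds (E : List (Int × Int)) : List Int := E.flatMap (fun e => [e.1, e.2])

theorem pvStep_symm (E : List (Int × Int)) : Symmetric (pvStep E) := by
  intro x y h; rcases h with h | h
  · exact Or.inr h
  · exact Or.inl h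

theorem pvConn_symm (E : List (Int × Int)) {x y : Int} (h : pvConn E x y) : pvConn E y x :=
  Relation.ReflTransGen.symmetric (pvStep_symm E) h

theorem pvConn_append_single (P : List (Int × Int)) (u v i j : Int) :
    pvConn (P ++ [(u, v)]) i j ↔
      pvConn P i j ∨ (pvConn P i u ∧ pvConn P v j) ∨ (pvConn P i v ∧ pvConn P u j) := by
  constructor
  · intro h
    induction h with
    | refl => exact Or.inl Relation.ReflTransGen.refl
    | @tail x y hxy hstep ih =>

      have hcase : pvStep P x y ∨ (x = u ∧ y = v) ∨ (x = v ∧ y = u) := by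
        rcases hstep with hs | hs <;> rw [List.mem_append] at hs <;>
          rcases hs with hs | hs
        · exact Or.inl (Or.inl hs)
        · simp at hs; exact Or.inr (Or.inl ⟨hs.1, hs.2⟩)
        · exact Or.inl (Or.inr hs)
        · simp at hs; exact Or.inr (Or.inr ⟨hs.2, hs.1⟩)
      rcases hcase with hs | ⟨rfl, rfl⟩ | ⟨rfl, rfl⟩
      · rcases ih with ih | ⟨h1, h2⟩ | ⟨h1, h2⟩
        · exact Or.inl (ih.tail hs)
        · exact Or.inr (Or.inl ⟨h1, h2.tail hs⟩)
        · exact Or.inr (Or.inr ⟨h1, h2.tail hs⟩)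
      · -- step u → v, chain reached x = u
        rcases ih with ih | ⟨h1, h2⟩ | ⟨h1, h2⟩
        · exact Or.inr (Or.inl ⟨ih, Relation.ReflTransGen.refl⟩)
        · exact Or.inr (Or.inl ⟨h1, Relation.ReflTransGen.refl⟩)
        · -- pvConn P i v ∧ pvConn P u u; target with j = v
          exact Or.inl h1
      · rcases ih with ih | ⟨h1, h2⟩ | ⟨h1, h2⟩
        · exact Or.inr (Or.inr ⟨ih, Relation.ReflTransGen.refl⟩)
        · exact Or.inl h1
        · exact Or.inr (Or.inr ⟨h1, Relation.ReflTransGen.refl⟩)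
  · have hmono : ∀ a b, pvConn P a b → pvConn (P ++ [(u, v)]) a b := by
      intro a b h
      exact Relation.ReflTransGen.mono (fun x y hs => by
        rcases hs with hs | hs
        · exact Or.inl (List.mem_append.mpr (Or.inl hs))
        · exact Or.inr (List.mem_append.mpr (Or.inl hs))) h
    have huv : pvConn (P ++ [(u, v)]) u v :=
      Relation.ReflTransGen.single (Or.inl (List.mem_append.mpr (Or.inr (by simp))))
    rintro (h | ⟨h1, h2⟩ | ⟨h1, h2⟩)
    · exact hmono _ _ h
    · exact ((hmono _ _ h1).trans huv).trans (hmono _ _ h2)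
    · exact ((hmono _ _ h1).trans (Relation.ReflTransGen.symmetric (pvStep_symm _) huv)).trans (hmono _ _ h2)

theorem pvSortPair_eq_key (e : Int × Int) : pvSortPair e = pvKey e.1 e.2 := by
  rcases e with ⟨u, v⟩
  have h : PySem.List.sorted [u, v] (fun x => x) false = if u < v then [u, v] else [v, u] := by
    split_ifs with h
    · exact PySem.List.sorted_id_eq_of_perm_of_pairwise [u, v] [u, v] (List.Perm.refl _)
        (by simp only [List.pairwise_cons, List.mem_singleton]
            exact ⟨fun b hb => by subst hb; omega, by simp⟩)
    · exact PySem.List.sorted_id_eq_of_perm_of_pairwise [u, v] [v, u] (List.Perm.swap u v [])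
        (by simp only [List.pairwise_cons, List.mem_singleton]
            exact ⟨fun b hb => by subst hb; omega, by simp⟩)
  simp only [pvSortPair, pvKey, h]
  split_ifs <;> rfl

theorem pvDupLoop_iff (rest : List (Int × Int)) : ∀ (d : PySem.Dict (Int × Int) Int),
    (∀ a, 0 ≤ d.getD a 0) →
    (pvDupLoop rest d = true ↔
      ((rest.map (fun e => pvKey e.1 e.2)).Nodup ∧
        ∀ e ∈ rest, d.getD (pvKey e.1 e.2) 0 = 0)) := by
  induction rest with
  | nil => intro d hnn; simp [pvDupLoop]
  | cons e t ih =>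
    intro d hnn
    simp only [pvDupLoop, pvSortPair_eq_key]
    rw [PySem.Dict.getD_modify_self]
    by_cases hpos : d.getD (pvKey e.1 e.2) 0 = 0
    · have : ¬ (d.getD (pvKey e.1 e.2) 0 + 1 > 1) := by omega
      simp only [this, if_false]
      rw [ih _ (by intro a; rw [PySem.Dict.getD_modify]; split_ifs with h
                   · omega
                   · exact hnn a)]
      simp only [List.map_cons, List.nodup_cons, List.mem_cons, List.mem_map]
      constructor
      · rintro ⟨hnd, hz⟩
        refine ⟨⟨?_, hnd⟩, ?_⟩
        · intro hmem
          rcases hmem with ⟨e', he', hk⟩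
          have := hz e' he'
          rw [PySem.Dict.getD_modify, if_pos hk] at this
          omega
        · rintro e' (rfl | he')
          · exact hpos
          · have := hz e' he'
            rw [PySem.Dict.getD_modify] at this
            split_ifs at this with h
            · omega
            · exact this
      · rintro ⟨⟨hne, hnd⟩, hz⟩
        refine ⟨hnd, fun e' he' => ?_⟩
        rw [PySem.Dict.getD_modify]
        split_ifs with h
        · exact absurd ⟨e', he', h⟩ hne
        · exact hz e' (Or.inr he')
    · have h1 : d.getD (pvKey e.1 e.2) 0 + 1 > 1 := by have := hnn (pvKey e.1 e.2); omega
      simp only [h1, if_true]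
      constructor
      · intro h; exact absurd h (by simp)
      · rintro ⟨-, hz⟩
        exact absurd (hz e (by simp)) hpos

theorem pvConn_mem_ends (P : List (Int × Int)) (i j : Int) (h : pvConn P i j) :
    i = j ∨ (i ∈ pvEnds P ∧ j ∈ pvEnds P) := by
  induction h with
  | refl => exact Or.inl rfl
  | @tail b c hab hstep ih =>
    have hbc : b ∈ pvEnds P ∧ c ∈ pvEnds P := by
      rcases hstep with h | h
      · exact ⟨List.mem_flatMap.mpr ⟨_, h, by simp⟩, List.mem_flatMap.mpr ⟨_, h, by simp⟩⟩
      · exact ⟨List.mem_flatMap.mpr ⟨_, h, by simp⟩, List.mem_flatMap.mpr ⟨_, h, by simp⟩⟩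
    rcases ih with rfl | ⟨h1, h2⟩
    · exact Or.inr ⟨hbc.1, hbc.2⟩
    · exact Or.inr ⟨h1, hbc.2⟩

-- ---------- the gate: self-loops / duplicate edges ----------

theorem pvGateLoop_iff (rest : List (Int × Int)) : ∀ (seen : PySem.Set (Int × Int)),
    (pvGateLoop rest seen = true ↔
      ((∀ e ∈ rest, e.1 ≠ e.2) ∧ (rest.map (fun e => pvKey e.1 e.2)).Nodup ∧
        ∀ e ∈ rest, ¬ (pvKey e.1 e.2) ∈ seen)) := by
  induction rest with
  | nil => intro seen; simp [pvGateLoop]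
  | cons e t ih =>
    rcases e with ⟨u, v⟩
    intro seen
    by_cases hne : u = v
    · simp only [pvGateLoop, beq_iff_eq, if_pos hne]
      constructor
      · intro h; exact absurd h (by simp)
      · rintro ⟨h1, -, -⟩; exact absurd hne (h1 (u, v) (by simp))
    by_cases hns : PySem.Set.contains seen (pvKey u v) = true
    · simp only [pvGateLoop]
      rw [if_neg (by simpa using hne), if_pos hns]
      constructor
      · intro h; exact absurd h (by simp)
      · rintro ⟨-, -, h3⟩
        exact absurd ((PySem.Set.contains_iff _ _).mp hns) (h3 (u, v) (by simp))
    simp only [pvGateLoop]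
    rw [if_neg (by simpa using hne), if_neg hns, ih]
    constructor
    · rintro ⟨g1, g2, g3⟩
      refine ⟨?_, ?_, ?_⟩
      · intro e he
        rcases List.mem_cons.mp he with rfl | he
        · exact hne
        · exact g1 e he
      · rw [List.map_cons, List.nodup_cons]
        refine ⟨?_, g2⟩
        intro hmem
        rcases List.mem_map.mp hmem with ⟨e2, he2, hk⟩
        exact g3 e2 he2 (by rw [hk]; exact (PySem.Set.mem_add _ _ _).mpr (Or.inr rfl))
      · intro e he
        rcases List.mem_cons.mp he with rfl | he
        · exact fun hmem => hns ((PySem.Set.contains_iff _ _).mpr hmem)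
        · exact fun hmem => g3 e he ((PySem.Set.mem_add _ _ _).mpr (Or.inl hmem))
    · rintro ⟨g1, g2, g3⟩
      rw [List.map_cons, List.nodup_cons] at g2
      refine ⟨fun e he => g1 e (by simp [he]), g2.2, ?_⟩
      intro e he hmem
      rcases (PySem.Set.mem_add _ _ _).mp hmem with hmem | hmem
      · exact g3 e (by simp [he]) hmem
      · exact g2.1 (List.mem_map.mpr ⟨e, he, hmem⟩)

-- ---------- connectivity: A's DFS ----------

theorem pvBuildGraph_eq (edges : List (Int × Int)) :
    pvBuildGraph edges =
      (edges.flatMap (fun e => [(e.1, e.2), (e.2, e.1)])).foldl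
        (fun g p => g.modify p.1 [] (· ++ [p.2])) PySem.Dict.empty := by
  show (edges.foldl _ PySem.Dict.empty) = _
  generalize PySem.Dict.empty = g0
  induction edges generalizing g0 with
  | nil => rfl
  | cons e t ih => simp only [List.foldl_cons, List.flatMap_cons, List.cons_append,
      List.nil_append, ih]

theorem pvBuildGraph_getD (edges : List (Int × Int)) (c : Int) :
    (pvBuildGraph edges).getD c [] =
      ((edges.flatMap (fun e => [(e.1, e.2), (e.2, e.1)])).filter (fun p => p.1 == c)).map (·.2) := by
  rw [pvBuildGraph_eq, PySem.Dict.getD_foldl_modify_append]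
  simp

theorem pvBuildGraph_mem_getD (edges : List (Int × Int)) (c y : Int) :
    y ∈ (pvBuildGraph edges).getD c [] ↔ pvStep edges c y := by
  rw [pvBuildGraph_getD]
  simp only [List.mem_map, List.mem_filter, List.mem_flatMap, pvStep]
  constructor
  · rintro ⟨p, ⟨⟨e, he, hp⟩, hc⟩, rfl⟩
    simp only [List.mem_cons, List.mem_singleton, List.not_mem_nil, or_false] at hp
    rcases hp with rfl | rfl
    · simp only [beq_iff_eq] at hc; subst hc; exact Or.inl (by simpa using he)
    · simp only [beq_iff_eq] at hc; subst hc; exact Or.inr (by simpa using he)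
  · rintro (h | h)
    · exact ⟨(c, y), ⟨⟨(c, y), h, by simp⟩, by simp⟩, rfl⟩
    · exact ⟨(c, y), ⟨⟨(y, c), h, by simp⟩, by simp⟩, rfl⟩

theorem pvBuildGraph_keys (edges : List (Int × Int)) :
    (pvBuildGraph edges).keys =
      PySem.Set.ofList ((edges.flatMap (fun e => [(e.1, e.2), (e.2, e.1)])).map (·.1)) := by
  rw [pvBuildGraph_eq]
  have h := PySem.Dict.keys_foldl_modify_key (edges.flatMap (fun e => [(e.1, e.2), (e.2, e.1)]))
    (fun p : Int × Int => p.1) ([] : List Int) (fun _ p old => old ++ [p.2]) PySem.Dict.empty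
  refine Eq.trans h ?_
  rw [show (PySem.Dict.empty : PySem.Dict Int (List Int)).keys = [] from rfl]
  rw [PySem.Set.update_nil_left]

theorem pvMemDirs (edges : List (Int × Int)) (x y : Int) :
    (x, y) ∈ edges.flatMap (fun e => [(e.1, e.2), (e.2, e.1)]) ↔ pvStep edges x y := by
  simp only [List.mem_flatMap, List.mem_cons, List.mem_singleton, List.not_mem_nil, or_false,
    pvStep]
  constructor
  · rintro ⟨⟨a, b⟩, he, h | h⟩ <;> simp only [Prod.ext_iff] at h <;> obtain ⟨rfl, rfl⟩ := h
    · exact Or.inl he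
    · exact Or.inr he
  · rintro (h | h)
    · exact ⟨(x, y), h, Or.inl rfl⟩
    · exact ⟨(y, x), h, Or.inr rfl⟩

theorem pvBuildGraph_closed (edges : List (Int × Int)) (x y : Int)
    (h : y ∈ (pvBuildGraph edges).getD x []) :
    x ∈ (pvBuildGraph edges).keys ∧ y ∈ (pvBuildGraph edges).keys := by
  rw [pvBuildGraph_mem_getD] at h
  rw [pvBuildGraph_keys]
  constructor
  · rw [PySem.Set.mem_ofList, List.mem_map]
    exact ⟨(x, y), (pvMemDirs edges x y).mpr h, rfl⟩
  · rw [PySem.Set.mem_ofList, List.mem_map]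
    exact ⟨(y, x), (pvMemDirs edges y x).mpr (by rcases h with h | h; exact Or.inr h; exact Or.inl h), rfl⟩

theorem pvBuildGraph_keys_card (edges : List (Int × Int)) :
    (pvBuildGraph edges).keys.toFinset.card ≤ 2 * edges.length := by
  rw [pvBuildGraph_keys]
  calc (PySem.Set.ofList ((edges.flatMap (fun e => [(e.1, e.2), (e.2, e.1)])).map (·.1))).toFinset.card
      ≤ (PySem.Set.ofList ((edges.flatMap (fun e => [(e.1, e.2), (e.2, e.1)])).map (·.1))).length :=
        List.toFinset_card_le _
    _ ≤ ((edges.flatMap (fun e => [(e.1, e.2), (e.2, e.1)])).map (·.1)).length :=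
        PySem.Set.length_ofList_le _
    _ = 2 * edges.length := by
        rw [List.length_map, List.length_flatMap]
        simp [List.map_const', Function.comp]
        omega

theorem pvDfs_spec (g : PySem.Dict Int (List Int))
    (hcl : ∀ x y, y ∈ g.getD x [] → x ∈ g.keys ∧ y ∈ g.keys) :
    ∀ (fuel : Nat) (vis : PySem.Set Int) (node : Int),
    vis.Nodup → node ∉ vis →
    (g.keys.toFinset \ vis.toFinset).card < fuel →
    (pvDfs g fuel vis node).Nodup ∧
    (∀ x ∈ vis, x ∈ pvDfs g fuel vis node) ∧
    node ∈ pvDfs g fuel vis node ∧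
    (∀ x ∈ pvDfs g fuel vis node, x ∈ vis ∨ Relation.ReflTransGen (fun a b => b ∈ g.getD a []) node x) ∧
    (∀ x ∈ pvDfs g fuel vis node, x ∉ vis → ∀ nb ∈ g.getD x [], nb ∈ pvDfs g fuel vis node) := by
  intro fuel
  induction fuel with
  | zero => intro vis node _ _ hf; exact absurd hf (Nat.not_lt_zero _)
  | succ fuel IH =>
    intro vis node hnd hnv hf
    have hv0nd : (PySem.Set.add vis node).Nodup := PySem.Set.nodup_add vis node hnd
    have hv0vis : ∀ x ∈ vis, x ∈ PySem.Set.add vis node :=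
      fun x hx => (PySem.Set.mem_add vis node x).mpr (Or.inl hx)
    have hv0node : node ∈ PySem.Set.add vis node :=
      (PySem.Set.mem_add vis node node).mpr (Or.inr rfl)
    have hv0bound : ∀ x ∈ PySem.Set.add vis node, x ∈ vis ∨
        Relation.ReflTransGen (fun a b => b ∈ g.getD a []) node x := by
      intro x hx
      rcases (PySem.Set.mem_add vis node x).mp hx with hx | rfl
      · exact Or.inl hx
      · exact Or.inr Relation.ReflTransGen.refl
    have fold : ∀ (nbs : List Int), (∀ nb ∈ nbs, nb ∈ g.getD node []) →
        ∀ (v : PySem.Set Int), v.Nodup → (∀ x ∈ vis, x ∈ v) → node ∈ v →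
        (∀ x ∈ v, x ∈ vis ∨ Relation.ReflTransGen (fun a b => b ∈ g.getD a []) node x) →
        (nbs.foldl (fun vis nb => if PySem.Set.contains vis nb then vis else pvDfs g fuel vis nb) v).Nodup ∧
        (∀ x ∈ v, x ∈ nbs.foldl (fun vis nb => if PySem.Set.contains vis nb then vis else pvDfs g fuel vis nb) v) ∧
        (∀ x ∈ nbs.foldl (fun vis nb => if PySem.Set.contains vis nb then vis else pvDfs g fuel vis nb) v,
          x ∈ vis ∨ Relation.ReflTransGen (fun a b => b ∈ g.getD a []) node x) ∧
        (∀ nb ∈ nbs, nb ∈ nbs.foldl (fun vis nb => if PySem.Set.contains vis nb then vis else pvDfs g fuel vis nb) v) ∧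
        (∀ x ∈ nbs.foldl (fun vis nb => if PySem.Set.contains vis nb then vis else pvDfs g fuel vis nb) v,
          x ∉ v → ∀ y ∈ g.getD x [], y ∈ nbs.foldl (fun vis nb => if PySem.Set.contains vis nb then vis else pvDfs g fuel vis nb) v) := by
      intro nbs
      induction nbs with
      | nil =>
        intro _ v hvnd hvvis hvnode hvbound
        exact ⟨hvnd, fun x hx => hx, hvbound, by simp, fun x hxm hxv => absurd hxm hxv⟩
      | cons nb t iht =>
        intro hnbs v hvnd hvvis hvnode hvbound
        simp only [List.foldl_cons]
        by_cases hc : PySem.Set.contains v nb = true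
        · rw [if_pos hc]
          obtain ⟨a1, a2, a3, a4, a5⟩ := iht (fun x hx => hnbs x (by simp [hx])) v hvnd hvvis hvnode hvbound
          refine ⟨a1, a2, a3, ?_, a5⟩
          intro nb' hnb'
          rcases List.mem_cons.mp hnb' with rfl | hnb'
          · exact a2 nb' ((PySem.Set.contains_iff v nb').mp hc)
          · exact a4 nb' hnb'
        · rw [if_neg hc]
          have hnbmem : nb ∈ g.getD node [] := hnbs nb (by simp)
          have hnbnv : nb ∉ v := fun hm => hc ((PySem.Set.contains_iff v nb).mpr hm)
          have hnodekey : node ∈ g.keys := (hcl node nb hnbmem).1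
          -- fuel bound for the recursive call
          have hcard : (g.keys.toFinset \ v.toFinset).card < fuel := by
            have hsub : g.keys.toFinset \ v.toFinset ⊆ (g.keys.toFinset \ vis.toFinset).erase node := by
              intro a ha
              rw [Finset.mem_sdiff] at ha
              rw [Finset.mem_erase, Finset.mem_sdiff]
              refine ⟨?_, ha.1, ?_⟩
              · rintro rfl; exact ha.2 (List.mem_toFinset.mpr hvnode)
              · intro hm; exact ha.2 (List.mem_toFinset.mpr (hvvis a (List.mem_toFinset.mp hm)))
            have hmem : node ∈ g.keys.toFinset \ vis.toFinset := by
              rw [Finset.mem_sdiff]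
              exact ⟨List.mem_toFinset.mpr hnodekey, fun hm => hnv (List.mem_toFinset.mp hm)⟩
            have := Finset.card_le_card hsub
            rw [Finset.card_erase_of_mem hmem] at this
            have hpos : 0 < (g.keys.toFinset \ vis.toFinset).card := Finset.card_pos.mpr ⟨node, hmem⟩
            omega
          obtain ⟨b1, b2, b3, b4, b5⟩ := IH v nb hvnd hnbnv hcard
          -- invariant for the new accumulator
          have hbound1 : ∀ x ∈ pvDfs g fuel v nb, x ∈ vis ∨
              Relation.ReflTransGen (fun a b => b ∈ g.getD a []) node x := by
            intro x hx
            rcases b4 x hx with hx' | hx'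
            · exact hvbound x hx'
            · exact Or.inr (Relation.ReflTransGen.head hnbmem hx')
          obtain ⟨a1, a2, a3, a4, a5⟩ := iht (fun x hx => hnbs x (by simp [hx]))
            (pvDfs g fuel v nb) b1 (fun x hx => b2 x (hvvis x hx)) (b2 node hvnode) hbound1
          refine ⟨a1, fun x hx => a2 x (b2 x hx), a3, ?_, ?_⟩
          · intro nb' hnb'
            rcases List.mem_cons.mp hnb' with rfl | hnb'
            · exact a2 nb' b3
            · exact a4 nb' hnb'
          · intro x hx hxv
            by_cases hx1 : x ∈ pvDfs g fuel v nb
            · intro y hy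
              exact a2 y (b5 x hx1 hxv y hy)
            · exact a5 x hx hx1
      -- end fold
    obtain ⟨a1, a2, a3, a4, a5⟩ := fold (g.getD node []) (fun _ h => h)
      (PySem.Set.add vis node) hv0nd hv0vis hv0node hv0bound
    simp only [pvDfs]
    refine ⟨a1, fun x hx => a2 x (hv0vis x hx), a2 node hv0node, ?_, ?_⟩
    · exact a3
    · intro x hx hxvis y hy
      by_cases hx0 : x ∈ PySem.Set.add vis node
      · rcases (PySem.Set.mem_add vis node x).mp hx0 with hx0 | rfl
        · exact absurd hx0 hxvis
        · exact a4 y hy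
      · exact a5 x hx hx0 y hy

theorem pvReach_iff (edges : List (Int × Int)) (a b : Int) :
    Relation.ReflTransGen (fun x y => y ∈ (pvBuildGraph edges).getD x []) a b ↔ pvConn edges a b := by
  constructor
  · exact Relation.ReflTransGen.mono (fun x y h => (pvBuildGraph_mem_getD edges x y).mp h)
  · exact Relation.ReflTransGen.mono (fun x y h => (pvBuildGraph_mem_getD edges x y).mpr h)

theorem pvDfs_visited (edges : List (Int × Int)) :
    (pvDfs (pvBuildGraph edges) (2 * edges.length + 1) PySem.Set.empty 1).Nodup ∧
    ∀ x : Int, x ∈ pvDfs (pvBuildGraph edges) (2 * edges.length + 1) PySem.Set.empty 1 ↔ pvConn edges 1 x := by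
  have hcard : ((pvBuildGraph edges).keys.toFinset \ (PySem.Set.empty : PySem.Set Int).toFinset).card <
      2 * edges.length + 1 := by
    have h1 := pvBuildGraph_keys_card edges
    have h2 : ((PySem.Set.empty : PySem.Set Int).toFinset : Finset Int) = ∅ := rfl
    rw [h2, Finset.sdiff_empty]
    omega
  obtain ⟨a1, _, a3, a4, a5⟩ := pvDfs_spec (pvBuildGraph edges) (pvBuildGraph_closed edges)
    (2 * edges.length + 1) PySem.Set.empty 1 List.nodup_nil (by simp [PySem.Set.empty]) hcard
  refine ⟨a1, fun x => ⟨?_, ?_⟩⟩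
  · intro hx
    rcases a4 x hx with h | h
    · exact absurd h (by simp [PySem.Set.empty])
    · exact (pvReach_iff edges 1 x).mp h
  · intro hconn
    have hreach := (pvReach_iff edges 1 x).mpr hconn
    clear hconn
    induction hreach with
    | refl => exact a3
    | @tail b c hab hstep ih =>
      exact a5 b ih (by simp [PySem.Set.empty]) c hstep

-- ---------- connectivity: B's component labels ----------

theorem pvMapVal_get? (f : Int → Int) (l : List (Int × Int)) (i : Int) :
    (PySem.Dict.mk (l.map (fun p => (p.1, f p.2)))).get? i = ((PySem.Dict.mk l).get? i).map f := by
  induction l with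
  | nil => rfl
  | cons p t ih =>
    rcases p with ⟨a, b⟩
    simp only [List.map_cons]
    rw [PySem.Dict.get?_mk_cons, PySem.Dict.get?_mk_cons]
    by_cases h : (a == i) = true
    · rw [if_pos h, if_pos h]; rfl
    · rw [if_neg h, if_neg h]; exact ih

theorem pvRelabel_getD (comp : PySem.Dict Int Int) (cu cv i : Int) (hi : i ∈ comp.keys) :
    (PySem.Dict.mk (comp.items.map (fun p => (p.1, if p.2 == cu then cv else p.2)))).getD i 0 =
      (if comp.getD i 0 = cu then cv else comp.getD i 0) := by
  obtain ⟨ci, hci⟩ : ∃ ci, comp.get? i = some ci := by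
    rcases h : comp.get? i with _ | ci
    · exact absurd hi ((PySem.Dict.get?_eq_none_iff_not_mem_keys _ _).mp h)
    · exact ⟨ci, rfl⟩
  have h1 := pvMapVal_get? (fun c => if c == cu then cv else c) comp.items i
  have h2 : PySem.Dict.mk comp.items = comp := rfl
  rw [h2, hci] at h1
  rw [PySem.Dict.getD_eq_get?_getD, h1]
  rw [PySem.Dict.getD_eq_get?_getD, hci]
  simp

theorem pvRelabel_keys (comp : PySem.Dict Int Int) (cu cv : Int) :
    (PySem.Dict.mk (comp.items.map (fun p => (p.1, if p.2 == cu then cv else p.2)))).keys = comp.keys := by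
  simp only [PySem.Dict.keys, List.map_map]
  rfl

-- one setdefault w w preserves the invariant for the same processed prefix P
theorem pvSetdefault_inv (P : List (Int × Int)) (c : PySem.Dict Int Int) (w : Int)
    (hnd : c.keys.Nodup)
    (hE : ∀ x ∈ pvEnds P, x ∈ c.keys)
    (hcl : ∀ i ∈ c.keys, c.getD i 0 ∈ c.keys)
    (hinv : ∀ i ∈ c.keys, ∀ j ∈ c.keys, (c.getD i 0 = c.getD j 0 ↔ pvConn P i j)) :
    (c.setdefault w w).keys.Nodup ∧
    (∀ x : Int, x ∈ (c.setdefault w w).keys ↔ x ∈ c.keys ∨ x = w) ∧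
    (∀ i ∈ (c.setdefault w w).keys, (c.setdefault w w).getD i 0 ∈ (c.setdefault w w).keys) ∧
    (∀ i ∈ (c.setdefault w w).keys, ∀ j ∈ (c.setdefault w w).keys,
      ((c.setdefault w w).getD i 0 = (c.setdefault w w).getD j 0 ↔ pvConn P i j)) := by
  by_cases hw : c.contains w = true
  · rw [PySem.Dict.setdefault_of_contains _ _ hw]
    have hwk : w ∈ c.keys := (PySem.Dict.contains_iff_mem_keys _ _).mp hw
    exact ⟨hnd, fun x => ⟨Or.inl, fun h => h.elim id (fun h => h ▸ hwk)⟩, hcl, hinv⟩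
  · have hw' : c.contains w = false := by simpa using hw
    have hwk : w ∉ c.keys := fun h => by
      rw [(PySem.Dict.contains_iff_mem_keys _ _).mpr h] at hw'; exact absurd hw' (by simp)
    rw [PySem.Dict.setdefault_of_not_contains _ _ hw']
    have hkeys : ∀ x : Int, x ∈ (c.insert w w).keys ↔ x = w ∨ x ∈ c.keys :=
      fun x => PySem.Dict.mem_keys_insert (d := c) (k' := x) (k := w) (v := w)
    have hgd : ∀ x : Int, (c.insert w w).getD x 0 = if x = w then w else c.getD x 0 :=
      fun x => PySem.Dict.getD_insert c w x w 0
    refine ⟨PySem.Dict.nodup_keys_insert c w w hnd, fun x => ⟨?_, ?_⟩, ?_, ?_⟩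
    · intro h; rcases (hkeys x).mp h with rfl | h
      · exact Or.inr rfl
      · exact Or.inl h
    · intro h; exact (hkeys x).mpr (h.elim Or.inr (fun h => Or.inl h))
    · intro i hi
      by_cases h1 : i = w
      · rw [hgd i, if_pos h1]
        exact (hkeys w).mpr (Or.inl rfl)
      · have hi' : i ∈ c.keys := ((hkeys i).mp hi).resolve_left h1
        rw [hgd i, if_neg h1]
        exact (hkeys _).mpr (Or.inr (hcl i hi'))
    · intro i hi j hj
      rw [hgd i, hgd j]
      by_cases h1 : i = w <;> by_cases h2 : j = w
      · rw [if_pos h1, if_pos h2]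
        refine ⟨fun _ => ?_, fun _ => rfl⟩
        rw [h1, h2]
        exact Relation.ReflTransGen.refl
      · have hj' : j ∈ c.keys := ((hkeys j).mp hj).resolve_left h2
        rw [if_pos h1, if_neg h2]
        constructor
        · intro h
          exact absurd (by rw [h]; exact hcl j hj' : w ∈ c.keys) hwk
        · intro h
          rw [h1] at h
          rcases pvConn_mem_ends P _ _ h with h | ⟨hh, _⟩
          · exact absurd h.symm h2
          · exact absurd (hE _ hh) hwk
      · have hi' : i ∈ c.keys := ((hkeys i).mp hi).resolve_left h1
        rw [if_neg h1, if_pos h2]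
        constructor
        · intro h
          exact absurd (by rw [← h]; exact hcl i hi' : w ∈ c.keys) hwk
        · intro h
          rw [h2] at h
          rcases pvConn_mem_ends P _ _ h with h | ⟨_, hh⟩
          · exact absurd h h1
          · exact absurd (hE _ hh) hwk
      · have hi' : i ∈ c.keys := ((hkeys i).mp hi).resolve_left h1
        have hj' : j ∈ c.keys := ((hkeys j).mp hj).resolve_left h2
        rw [if_neg h1, if_neg h2]
        exact hinv i hi' j hj'

theorem pvCompLoop_spec : ∀ (E P : List (Int × Int)) (comp : PySem.Dict Int Int),
    comp.keys.Nodup →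
    (∀ x : Int, x ∈ comp.keys ↔ x ∈ pvEnds P) →
    (∀ i ∈ comp.keys, comp.getD i 0 ∈ comp.keys) →
    (∀ i ∈ comp.keys, ∀ j ∈ comp.keys, (comp.getD i 0 = comp.getD j 0 ↔ pvConn P i j)) →
    (pvCompLoop E comp).keys.Nodup ∧
    (∀ x : Int, x ∈ (pvCompLoop E comp).keys ↔ x ∈ pvEnds (P ++ E)) ∧
    (∀ i ∈ (pvCompLoop E comp).keys, (pvCompLoop E comp).getD i 0 ∈ (pvCompLoop E comp).keys) ∧
    (∀ i ∈ (pvCompLoop E comp).keys, ∀ j ∈ (pvCompLoop E comp).keys,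
      ((pvCompLoop E comp).getD i 0 = (pvCompLoop E comp).getD j 0 ↔ pvConn (P ++ E) i j)) := by
  intro E
  induction E with
  | nil => intro P comp hnd hmem hcl hinv; simpa using ⟨hnd, hmem, hcl, hinv⟩
  | cons e t ih =>
    rcases e with ⟨u, v⟩
    intro P comp hnd hmem hcl hinv
    have hE : ∀ x ∈ pvEnds P, x ∈ comp.keys := fun x hx => (hmem x).mpr hx
    obtain ⟨nd1, mem1, cl1, inv1⟩ := pvSetdefault_inv P comp u hnd hE hcl hinv
    have hE1 : ∀ x ∈ pvEnds P, x ∈ (comp.setdefault u u).keys :=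
      fun x hx => (mem1 x).mpr (Or.inl ((hmem x).mpr hx))
    obtain ⟨nd2, mem2, cl2, inv2⟩ := pvSetdefault_inv P (comp.setdefault u u) v nd1 hE1 cl1 inv1
    set c2 := (comp.setdefault u u).setdefault v v with hc2
    have hmem2 : ∀ x : Int, x ∈ c2.keys ↔ x ∈ pvEnds P ∨ x = u ∨ x = v := by
      intro x
      rw [mem2, mem1, hmem]
      tauto
    have hmem2' : ∀ x : Int, x ∈ c2.keys ↔ x ∈ pvEnds (P ++ [(u, v)]) := by
      intro x
      rw [hmem2]
      simp only [pvEnds, List.flatMap_append, List.mem_append, List.flatMap_cons,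
        List.flatMap_nil, List.append_nil, List.mem_cons, List.not_mem_nil, or_false]
    have huk : u ∈ c2.keys := (hmem2 u).mpr (Or.inr (Or.inl rfl))
    have hvk : v ∈ c2.keys := (hmem2 v).mpr (Or.inr (Or.inr rfl))
    have happ : P ++ (u, v) :: t = (P ++ [(u, v)]) ++ t := by simp
    simp only [pvCompLoop]
    rw [happ]
    by_cases hcase : c2.getD u 0 = c2.getD v 0
    · have hbe : (c2.getD u 0 != c2.getD v 0) = false := by simp [hcase]
      rw [hbe]
      simp only [Bool.false_eq_true, if_false]
      have huv : pvConn P u v := (inv2 u huk v hvk).mp hcase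
      have hinv' : ∀ i ∈ c2.keys, ∀ j ∈ c2.keys,
          (c2.getD i 0 = c2.getD j 0 ↔ pvConn (P ++ [(u, v)]) i j) := by
        intro i hi j hj
        rw [inv2 i hi j hj, pvConn_append_single]
        constructor
        · exact Or.inl
        · rintro (h | ⟨h1, h2⟩ | ⟨h1, h2⟩)
          · exact h
          · exact (h1.trans huv).trans h2
          · exact (h1.trans (pvConn_symm P huv)).trans h2
      exact ih (P ++ [(u, v)]) c2 nd2 hmem2' cl2 hinv'
    · have hbe : (c2.getD u 0 != c2.getD v 0) = true := by simp [hcase]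
      rw [hbe]
      simp only [if_true]
      set cu := c2.getD u 0 with hcu
      set cv := c2.getD v 0 with hcv
      set c3 := PySem.Dict.mk (c2.items.map (fun p => (p.1, if p.2 == cu then cv else p.2))) with hc3
      have hk3 : c3.keys = c2.keys := pvRelabel_keys c2 cu cv
      have hget : ∀ i ∈ c2.keys, c3.getD i 0 = (if c2.getD i 0 = cu then cv else c2.getD i 0) :=
        fun i hi => pvRelabel_getD c2 cu cv i hi
      have hcl3 : ∀ i ∈ c3.keys, c3.getD i 0 ∈ c3.keys := by
        intro i hi
        rw [hk3] at hi
        rw [hk3, hget i hi]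
        split_ifs
        · exact cl2 v hvk
        · exact cl2 i hi
      have hinv3 : ∀ i ∈ c3.keys, ∀ j ∈ c3.keys,
          (c3.getD i 0 = c3.getD j 0 ↔ pvConn (P ++ [(u, v)]) i j) := by
        intro i hi j hj
        rw [hk3] at hi hj
        rw [hget i hi, hget j hj, pvConn_append_single]
        have hiu := inv2 i hi u huk
        have hju := inv2 j hj u huk
        have hiv := inv2 i hi v hvk
        have hjv := inv2 j hj v hvk
        have hij := inv2 i hi j hj
        by_cases h1 : c2.getD i 0 = cu <;> by_cases h2 : c2.getD j 0 = cu
        · rw [if_pos h1, if_pos h2]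
          constructor
          · intro _
            exact Or.inl ((hiu.mp h1).trans (pvConn_symm P (hju.mp h2)))
          · intro _
            rfl
        · rw [if_pos h1, if_neg h2]
          constructor
          · intro h
            exact Or.inr (Or.inl ⟨hiu.mp h1, pvConn_symm P (hjv.mp h.symm)⟩)
          · rintro (h | ⟨ha, hb⟩ | ⟨ha, hb⟩)
            · exact absurd (h1 ▸ hij.mpr h).symm h2
            · exact (hjv.mpr (pvConn_symm P hb)).symm
            · exact absurd (hju.mpr (pvConn_symm P hb)) h2
        · rw [if_neg h1, if_pos h2]
          constructor
          · intro h
            exact Or.inr (Or.inr ⟨hiv.mp h, pvConn_symm P (hju.mp h2)⟩)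
          · rintro (h | ⟨ha, hb⟩ | ⟨ha, hb⟩)
            · exact absurd ((hij.mpr h).trans h2) h1
            · exact absurd (hiu.mpr ha) h1
            · exact hiv.mpr ha
        · rw [if_neg h1, if_neg h2]
          constructor
          · intro h
            exact Or.inl (hij.mp h)
          · rintro (h | ⟨ha, hb⟩ | ⟨ha, hb⟩)
            · exact hij.mpr h
            · exact absurd (hiu.mpr ha) h1
            · exact absurd (hju.mpr (pvConn_symm P hb)) h2
      have hmem3 : ∀ x : Int, x ∈ c3.keys ↔ x ∈ pvEnds (P ++ [(u, v)]) := by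
        intro x; rw [hk3]; exact hmem2' x
      exact ih (P ++ [(u, v)]) c3 (hk3 ▸ nd2) hmem3 hcl3 hinv3

-- ---------- assembly ----------

theorem check_requirements_eq (n k : Int) (edges : List (Int × Int)) :
    check_requirements n k edges = check_requirements_alt n k edges := by
  by_cases hemp : edges = []
  · subst hemp; rfl
  have hisemp : edges.isEmpty = false := by simp [hemp]
  simp only [check_requirements, check_requirements_alt, hisemp, Bool.false_eq_true, if_false]
  by_cases hgood : (∀ e ∈ edges, e.1 ≠ e.2) ∧ (edges.map (fun e => pvKey e.1 e.2)).Nodup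
  · -- all validity checks pass on both sides
    obtain ⟨hloops, hnodup⟩ := hgood
    have hc1 : (PySem.Set.len (PySem.Set.ofList edges) == (edges.length : Int)) = true := by
      rw [PySem.Set.ofList_eq_self_of_nodup edges (List.Nodup.of_map _ hnodup)]
      simp [PySem.Set.len]
    have hany : edges.any (fun e => e.1 == e.2) = false := by
      rw [List.any_eq_false]
      intro e he
      simpa using hloops e he
    have hdup : pvDupLoop edges PySem.Dict.empty = true := by
      rw [pvDupLoop_iff edges PySem.Dict.empty (fun a => by rw [PySem.Dict.getD_empty])]
      exact ⟨hnodup, fun e _ => PySem.Dict.getD_empty _ 0⟩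
    have hgl : pvGateLoop edges PySem.Set.empty = true := by
      rw [pvGateLoop_iff]
      exact ⟨hloops, hnodup, fun e _ h => by simp [PySem.Set.empty] at h⟩
    rw [hc1, hany, hdup, hgl]
    simp only [Bool.not_true, Bool.false_eq_true, if_false]
    cases hml : pvDegLoop edges (PySem.List.pyRepeat [0] (n + 1)) with
    | none => rfl
    | some degree =>
      dsimp only
      by_cases hdeg : (PySem.Set.len (PySem.Set.ofList (PySem.List.slice degree (some 1) none)) == k) = true
      · rw [hdeg]
        simp only [Bool.not_true, Bool.false_eq_true, if_false]
        -- connectivity: |DFS visited set| = size of 1's component among the merged labels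
        obtain ⟨hvnd, hvmem⟩ := pvDfs_visited edges
        obtain ⟨hnd, hmem, hcl, hinv⟩ := pvCompLoop_spec edges [] PySem.Dict.empty
          (by simp [PySem.Dict.empty, PySem.Dict.keys])
          (by intro x; simp [PySem.Dict.empty, PySem.Dict.keys, pvEnds])
          (by intro i hi; simp [PySem.Dict.empty, PySem.Dict.keys] at hi)
          (by intro i hi; simp [PySem.Dict.empty, PySem.Dict.keys] at hi)
        rw [List.nil_append] at hmem hinv
        have hsz : PySem.Set.len (pvDfs (pvBuildGraph edges) (2 * edges.length + 1) PySem.Set.empty 1) =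
            (((pvCompLoop edges PySem.Dict.empty).values.countP
              (fun c => c == ((pvCompLoop edges PySem.Dict.empty).get? 1).getD 1) : Nat) : Int) +
            (if (pvCompLoop edges PySem.Dict.empty).contains 1 then 0 else 1) := by
          set C := pvCompLoop edges PySem.Dict.empty with hC
          set V := pvDfs (pvBuildGraph edges) (2 * edges.length + 1) PySem.Set.empty 1 with hV
          have hvals : C.values = C.keys.map (fun kk => C.getD kk 0) :=
            PySem.Dict.values_eq_map_keys C hnd 0
          by_cases h1 : C.contains 1 = true
          · have h1k : (1 : Int) ∈ C.keys := (PySem.Dict.contains_iff_mem_keys _ _).mp h1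
            obtain ⟨c1v, hc1v⟩ : ∃ y, C.get? 1 = some y := by
              rcases h : C.get? 1 with _ | y
              · exact absurd h1k ((PySem.Dict.get?_eq_none_iff_not_mem_keys _ _).mp h)
              · exact ⟨y, rfl⟩
            have hr1 : (C.get? 1).getD 1 = C.getD 1 0 := by
              rw [hc1v, PySem.Dict.getD_eq_get?_getD, hc1v]
              rfl
            have hcount : C.values.countP (fun c => c == (C.get? 1).getD 1) =
                (C.keys.filter (fun kk => C.getD kk 0 == C.getD 1 0)).length := by
              rw [hvals, List.countP_map, List.countP_eq_length_filter]
              exact congrArg List.length (List.filter_congr (fun kk _ => by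
                show (C.getD kk 0 == (C.get? 1).getD 1) = (C.getD kk 0 == C.getD 1 0)
                rw [hr1]))
            have hperm : V.Perm (C.keys.filter (fun kk => C.getD kk 0 == C.getD 1 0)) := by
              rw [List.perm_ext_iff_of_nodup hvnd (List.Nodup.filter _ hnd)]
              intro x
              rw [hvmem x, List.mem_filter]
              constructor
              · intro hconn
                have hxk : x ∈ C.keys := by
                  rcases pvConn_mem_ends edges 1 x hconn with rfl | ⟨_, h2⟩
                  · exact h1k
                  · exact (hmem x).mpr h2
                refine ⟨hxk, ?_⟩
                rw [beq_iff_eq]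
                exact (hinv x hxk 1 h1k).mpr (pvConn_symm edges hconn)
              · rintro ⟨hxk, hx⟩
                rw [beq_iff_eq] at hx
                exact pvConn_symm edges ((hinv x hxk 1 h1k).mp hx)
            rw [show PySem.Set.len V = ((V.length : Nat) : Int) from rfl]
            rw [hperm.length_eq, hcount, if_pos h1]
            omega
          · have h1f : C.contains 1 = false := by simpa using h1
            have h1k : (1 : Int) ∉ C.keys := fun h => by
              rw [(PySem.Dict.contains_iff_mem_keys _ _).mpr h] at h1f
              exact absurd h1f (by simp)
            have hr1 : (C.get? 1).getD 1 = 1 := by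
              rcases h : C.get? 1 with _ | y
              · rfl
              · exact absurd ((PySem.Dict.contains_iff_mem_keys _ _).mp
                  (by rw [PySem.Dict.contains_eq_isSome_get?, h]; rfl)) h1k
            have hcount : C.values.countP (fun c => c == (C.get? 1).getD 1) = 0 := by
              rw [List.countP_eq_zero]
              intro c hc
              rw [hvals, List.mem_map] at hc
              obtain ⟨kk, hkk, rfl⟩ := hc
              rw [hr1, beq_iff_eq]
              intro hcontra
              exact h1k (hcontra ▸ hcl kk hkk)
            have hperm : V.Perm [1] := by
              rw [List.perm_ext_iff_of_nodup hvnd (by simp)]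
              intro x
              rw [hvmem x, List.mem_singleton]
              constructor
              · intro hconn
                rcases pvConn_mem_ends edges 1 x hconn with rfl | ⟨h1e, _⟩
                · rfl
                · exact absurd ((hmem 1).mpr h1e) h1k
              · rintro rfl
                exact Relation.ReflTransGen.refl
            rw [show PySem.Set.len V = ((V.length : Nat) : Int) from rfl]
            rw [hperm.length_eq, hcount, if_neg (by simp [h1f])]
            rfl
        show (PySem.Set.len (pvDfs (pvBuildGraph edges) (2 * edges.length + 1) PySem.Set.empty 1) == n) = _
        rw [hsz]
      · rw [Bool.not_eq_true] at hdeg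
        rw [hdeg]
        simp
  · -- some validity check fails on both sides
    have hgl : pvGateLoop edges PySem.Set.empty = false := by
      rw [Bool.eq_false_iff]
      intro htrue
      rw [pvGateLoop_iff] at htrue
      exact hgood ⟨htrue.1, htrue.2.1⟩
    rw [hgl]
    simp only [Bool.not_false, if_true]
    by_cases hc1 : (PySem.Set.len (PySem.Set.ofList edges) == (edges.length : Int)) = true
    · rw [hc1]
      simp only [Bool.not_true, Bool.false_eq_true, if_false]
      by_cases hany : edges.any (fun e => e.1 == e.2) = true
      · rw [hany]
        simp
      · rw [Bool.not_eq_true] at hany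
        rw [hany]
        simp only [Bool.false_eq_true, if_false]
        have hloops : ∀ e ∈ edges, e.1 ≠ e.2 := by
          rw [List.any_eq_false] at hany
          intro e he
          simpa using hany e he
        have hdup : pvDupLoop edges PySem.Dict.empty = false := by
          rw [Bool.eq_false_iff]
          intro htrue
          rw [pvDupLoop_iff edges PySem.Dict.empty (fun a => by rw [PySem.Dict.getD_empty])] at htrue
          exact hgood ⟨hloops, htrue.1⟩
        rw [hdup]
        simp
    · rw [Bool.not_eq_true] at hc1
      rw [hc1]
      simp

-- ===== VERDICT (by name: the statement is the Claim_ definition above) =====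
theorem check_requirements_spec : Claim_equal_check_requirements := by
  intro n k edges _ _
  exact check_requirements_eq n k edges
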